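-- pv_equiv track=rewrite | github.com/krishnm10/MarketingAdvantage_AI | app/services/validation/semantic_conflict_engine.py | _detect_polarity_conflict
-- ===== SOURCE A (Python) =====
-- from typing import Dict, Any, List, Optional, Tuple
--
-- POSITIVE_TERMS = {
--     "increase", "improve", "boost", "grow", "enhance", "strengthen",
--     "optimize", "accelerate", "expand", "elevate", "maximize",
--     "reduce risk", "reduce cost", "reduce time", "increase revenue",
--     "increase profit", "increase efficiency", "better", "higher",
--     "faster", "stronger", "successful", "effective"
-- }
--
-- NEGATIVE_TERMS = {
--     "decrease", "reduce", "decline", "worsen", "diminish", "weaken",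
--     "hurt", "damage", "impair", "limit", "restrict", "constrain",
--     "raise cost", "raise risk", "increase risk", "increase cost",
--     "lower", "slower", "worse", "failed", "ineffective", "problematic"
-- }
--
-- METRIC_KEYWORDS = {
--     "productivity": {
--         "productivity", "efficiency", "output", "throughput",
--         "utilization", "performance", "capacity"
--     },
--     "cost": {
--         "cost", "expense", "spend", "budget", "price",
--         "overhead", "opex", "capex"
--     },
--     "revenue": {
--         "revenue", "sales", "income", "profit", "margin",
--         "earnings", "return", "roi"
--     },
--     "risk": {
--         "risk", "exposure", "liability", "threat", "vulnerability",
--         "compliance", "security", "safety"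
--     },
--     "quality": {
--         "quality", "accuracy", "reliability", "consistency",
--         "defect", "error", "issue", "problem"
--     },
--     "time": {
--         "time", "duration", "speed", "latency", "cycle time",
--         "lead time", "response time", "turnaround"
--     },
--     "customer": {
--         "customer satisfaction", "nps", "churn", "retention",
--         "engagement", "loyalty", "experience"
--     },
-- }
--
-- def _detect_polarity_conflict(
--     text_a: str,
--     text_b: str
-- ) -> Tuple[Optional[str], Optional[str], Optional[str]]:
--     """
--     Detect if two texts make opposing claims about the same metric.
--
--     Returns:
--         (metric, polarity_a, polarity_b) or (None, None, None)
--     """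
--     text_a_lower = text_a.lower()
--     text_b_lower = text_b.lower()
--
--     # Check each metric category
--     for metric_name, metric_keywords in METRIC_KEYWORDS.items():
--
--         # Both texts must mention this metric
--         a_has_metric = any(kw in text_a_lower for kw in metric_keywords)
--         b_has_metric = any(kw in text_b_lower for kw in metric_keywords)
--
--         if not (a_has_metric and b_has_metric):
--             continue
--
--         # Determine polarity for text A
--         a_positive = any(term in text_a_lower for term in POSITIVE_TERMS)
--         a_negative = any(term in text_a_lower for term in NEGATIVE_TERMS)
--
--         if a_positive and not a_negative:
--             polarity_a = "positive"
--         elif a_negative and not a_positive: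
--             polarity_a = "negative"
--         else:
--             polarity_a = "neutral"
--
--         # Determine polarity for text B
--         b_positive = any(term in text_b_lower for term in POSITIVE_TERMS)
--         b_negative = any(term in text_b_lower for term in NEGATIVE_TERMS)
--
--         if b_positive and not b_negative:
--             polarity_b = "positive"
--         elif b_negative and not b_positive:
--             polarity_b = "negative"
--         else:
--             polarity_b = "neutral"
--
--         # Conflict exists if polarities are opposite (not neutral)
--         if (polarity_a != polarity_b and
--             "neutral" not in (polarity_a, polarity_b)):
--             return metric_name, polarity_a, polarity_b
--
--     # No conflict detected
--     return None, None, None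
-- ===== SOURCE B (Python) =====
-- POSITIVE_TERMS = {
--     "increase", "improve", "boost", "grow", "enhance", "strengthen",
--     "optimize", "accelerate", "expand", "elevate", "maximize",
--     "reduce risk", "reduce cost", "reduce time", "increase revenue",
--     "increase profit", "increase efficiency", "better", "higher",
--     "faster", "stronger", "successful", "effective"
-- }
--
-- NEGATIVE_TERMS = {
--     "decrease", "reduce", "decline", "worsen", "diminish", "weaken",
--     "hurt", "damage", "impair", "limit", "restrict", "constrain",
--     "raise cost", "raise risk", "increase risk", "increase cost",
--     "lower", "slower", "worse", "failed", "ineffective", "problematic"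
-- }
--
-- METRIC_KEYWORDS = {
--     "productivity": {
--         "productivity", "efficiency", "output", "throughput",
--         "utilization", "performance", "capacity"
--     },
--     "cost": {
--         "cost", "expense", "spend", "budget", "price",
--         "overhead", "opex", "capex"
--     },
--     "revenue": {
--         "revenue", "sales", "income", "profit", "margin",
--         "earnings", "return", "roi"
--     },
--     "risk": {
--         "risk", "exposure", "liability", "threat", "vulnerability",
--         "compliance", "security", "safety"
--     },
--     "quality": {
--         "quality", "accuracy", "reliability", "consistency",
--         "defect", "error", "issue", "problem"
--     },
--     "time": {
--         "time", "duration", "speed", "latency", "cycle time",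
--         "lead time", "response time", "turnaround"
--     },
--     "customer": {
--         "customer satisfaction", "nps", "churn", "retention",
--         "engagement", "loyalty", "experience"
--     },
-- }
--
-- # One flat tagged vocabulary: every term carries its meaning ("+", "-", or a metric name).
-- _TERM_TABLE = (
--     [(term, "+") for term in POSITIVE_TERMS]
--     + [(term, "-") for term in NEGATIVE_TERMS]
--     + [(kw, metric) for metric, kws in METRIC_KEYWORDS.items() for kw in kws]
-- )
--
-- _METRIC_ORDER = list(METRIC_KEYWORDS)
--
--
-- def _profile(text):
--     """Single pass over the tagged vocabulary: polarity + set of metrics mentioned."""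
--     t = text.lower()
--     pos = False
--     neg = False
--     metrics = set()
--     for term, tag in _TERM_TABLE:
--         if term in t:
--             if tag == "+":
--                 pos = True
--             elif tag == "-":
--                 neg = True
--             else:
--                 metrics.add(tag)
--     if pos and not neg:
--         polarity = "positive"
--     elif neg and not pos:
--         polarity = "negative"
--     else:
--         polarity = "neutral"
--     return polarity, metrics
--
--
-- def _detect_polarity_conflict(text_a, text_b):
--     polarity_a, metrics_a = _profile(text_a)
--     polarity_b, metrics_b = _profile(text_b)
--     if polarity_a != polarity_b and polarity_a != "neutral" and polarity_b != "neutral":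
--         for metric in _METRIC_ORDER:
--             if metric in metrics_a and metric in metrics_b:
--                 return metric, polarity_a, polarity_b
--     return None, None, None
-- ===== Notes on version B (the rewrite author's own statement) =====
-- stated objective: alternative
-- what changed: B replaces A's per-metric loop (which re-tests polarity terms and metric keywords inside each iteration) by one pass per text over a single flat tagged term table, building a profile (polarity flags plus the set of metrics mentioned), and then combines the two profiles: conflict check first, then the first metric in definition order contained in both metric sets.
import Mathlib
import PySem

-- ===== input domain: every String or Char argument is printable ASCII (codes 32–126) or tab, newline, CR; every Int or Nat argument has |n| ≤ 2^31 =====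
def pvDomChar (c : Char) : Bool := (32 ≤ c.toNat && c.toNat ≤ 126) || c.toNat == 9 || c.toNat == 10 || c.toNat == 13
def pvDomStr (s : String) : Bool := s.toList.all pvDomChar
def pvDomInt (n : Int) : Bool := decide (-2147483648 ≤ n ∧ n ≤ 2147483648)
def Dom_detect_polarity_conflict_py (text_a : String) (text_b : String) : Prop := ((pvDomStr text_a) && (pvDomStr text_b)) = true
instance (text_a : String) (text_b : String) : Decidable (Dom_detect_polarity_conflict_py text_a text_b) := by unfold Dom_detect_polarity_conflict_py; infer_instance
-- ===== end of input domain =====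

-- B scans one flat tagged term table once per text, building a profile (polarity flags + set
-- of metrics mentioned), then combines the two profiles ('alternative' decomposition).

-- Module-level constants of A.  The Python iterates these term sets only through
-- `any(term in text ...)`, which is order-independent, so a fixed source-order list is an
-- exact port of the set iteration.
def pvPositiveTerms : List String :=
  ["increase", "improve", "boost", "grow", "enhance", "strengthen",
   "optimize", "accelerate", "expand", "elevate", "maximize",
   "reduce risk", "reduce cost", "reduce time", "increase revenue",
   "increase profit", "increase efficiency", "better", "higher",
   "faster", "stronger", "successful", "effective"]

def pvNegativeTerms : List String :=
  ["decrease", "reduce", "decline", "worsen", "diminish", "weaken",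
   "hurt", "damage", "impair", "limit", "restrict", "constrain",
   "raise cost", "raise risk", "increase risk", "increase cost",
   "lower", "slower", "worse", "failed", "ineffective", "problematic"]

def pvMetricKeywords : List (String × List String) :=
  [("productivity", ["productivity", "efficiency", "output", "throughput",
                     "utilization", "performance", "capacity"]),
   ("cost", ["cost", "expense", "spend", "budget", "price",
             "overhead", "opex", "capex"]),
   ("revenue", ["revenue", "sales", "income", "profit", "margin",
                "earnings", "return", "roi"]),
   ("risk", ["risk", "exposure", "liability", "threat", "vulnerability",
             "compliance", "security", "safety"]),
   ("quality", ["quality", "accuracy", "reliability", "consistency",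
                "defect", "error", "issue", "problem"]),
   ("time", ["time", "duration", "speed", "latency", "cycle time",
             "lead time", "response time", "turnaround"]),
   ("customer", ["customer satisfaction", "nps", "churn", "retention",
                 "engagement", "loyalty", "experience"])]

-- ===== PORT A =====
-- `any(kw in text for kw in kws)`
def pvAnyIn (kws : List String) (text : String) : Bool :=
  kws.any (fun kw => PySem.Str.isIn kw text)

-- the `for metric_name, metric_keywords in METRIC_KEYWORDS.items():` loop of A,
-- recomputing both polarities on every iteration exactly as A does
def pvALoop (ta tb : String) : List (String × List String) → Option String × Option String × Option String
  | [] => (none, none, none)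
  | (metric_name, metric_keywords) :: rest =>
    let a_has_metric := pvAnyIn metric_keywords ta
    let b_has_metric := pvAnyIn metric_keywords tb
    if !(a_has_metric && b_has_metric) then pvALoop ta tb rest
    else
      let a_positive := pvAnyIn pvPositiveTerms ta
      let a_negative := pvAnyIn pvNegativeTerms ta
      let polarity_a := if a_positive && !a_negative then "positive"
                        else if a_negative && !a_positive then "negative"
                        else "neutral"
      let b_positive := pvAnyIn pvPositiveTerms tb
      let b_negative := pvAnyIn pvNegativeTerms tb
      let polarity_b := if b_positive && !b_negative then "positive"
                        else if b_negative && !b_positive then "negative"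
                        else "neutral"
      if polarity_a != polarity_b && !(polarity_a == "neutral" || polarity_b == "neutral") then
        (some metric_name, some polarity_a, some polarity_b)
      else pvALoop ta tb rest

def detect_polarity_conflict_py (text_a : String) (text_b : String) : Option String × Option String × Option String :=
  pvALoop (PySem.Str.lower text_a) (PySem.Str.lower text_b) pvMetricKeywords

-- ===== PORT B =====
-- B's `_TERM_TABLE`: the whole vocabulary tagged with its meaning ("+", "-", or a metric name)
def pvTermTable : List (String × String) :=
  pvPositiveTerms.map (fun term => (term, "+"))
  ++ pvNegativeTerms.map (fun term => (term, "-"))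
  ++ pvMetricKeywords.flatMap (fun m => m.2.map (fun kw => (kw, m.1)))

-- B's `_METRIC_ORDER = list(METRIC_KEYWORDS)`
def pvMetricOrder : List String := pvMetricKeywords.map Prod.fst

-- body of B's `for term, tag in _TERM_TABLE:` loop
def pvProfileStep (t : String) (acc : Bool × Bool × PySem.Set String) (e : String × String) :
    Bool × Bool × PySem.Set String :=
  if PySem.Str.isIn e.1 t then
    if e.2 == "+" then (true, acc.2.1, acc.2.2)
    else if e.2 == "-" then (acc.1, true, acc.2.2)
    else (acc.1, acc.2.1, PySem.Set.add acc.2.2 e.2)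
  else acc

-- B's `_profile`
def pvProfile (text : String) : String × PySem.Set String :=
  let t := PySem.Str.lower text
  let r := pvTermTable.foldl (pvProfileStep t) (false, false, PySem.Set.empty)
  let polarity := if r.1 && !r.2.1 then "positive"
                  else if r.2.1 && !r.1 then "negative"
                  else "neutral"
  (polarity, r.2.2)

def detect_polarity_conflict_py_alt (text_a : String) (text_b : String) :
    Option String × Option String × Option String :=
  let pa := pvProfile text_a
  let pb := pvProfile text_b
  if pa.1 != pb.1 && pa.1 != "neutral" && pb.1 != "neutral" then
    match pvMetricOrder.find? (fun metric => PySem.Set.contains pa.2 metric && PySem.Set.contains pb.2 metric) with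
    | some metric => (some metric, some pa.1, some pb.1)
    | none => (none, none, none)
  else (none, none, none)

-- ===== PRECONDITION & SPEC =====
def Spec_detect_polarity_conflict_py (text_a : String) (text_b : String) (out : Option String × Option String × Option String) : Prop := out = detect_polarity_conflict_py_alt text_a text_b
instance (text_a : String) (text_b : String) (out : Option String × Option String × Option String) : Decidable (Spec_detect_polarity_conflict_py text_a text_b out) := by unfold Spec_detect_polarity_conflict_py; infer_instance

-- ===== CLAIM (what is proved, stated in full; the proofs are below) =====
def Claim_equal_detect_polarity_conflict_py : Prop := ∀ (text_a : String) (text_b : String), Dom_detect_polarity_conflict_py text_a text_b → Spec_detect_polarity_conflict_py text_a text_b (detect_polarity_conflict_py text_a text_b)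

-- ===== LEMMAS AND PROOFS =====

-- A's polarity computation, as a function (proof-only helper)
def polA (t : String) : String :=
  if pvAnyIn pvPositiveTerms t && !pvAnyIn pvNegativeTerms t then "positive"
  else if pvAnyIn pvNegativeTerms t && !pvAnyIn pvPositiveTerms t then "negative"
  else "neutral"

-- characterisation of B's fold over an arbitrary tagged list, arbitrary accumulator
theorem pvProfile_fold_spec (t : String) (L : List (String × String)) (p n : Bool) (s : PySem.Set String) :
    ((L.foldl (pvProfileStep t) (p, n, s)).1
        = (p || L.any (fun e => e.2 == "+" && PySem.Str.isIn e.1 t)))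
    ∧ ((L.foldl (pvProfileStep t) (p, n, s)).2.1
        = (n || L.any (fun e => e.2 == "-" && PySem.Str.isIn e.1 t)))
    ∧ (∀ m : String, m ≠ "+" → m ≠ "-" → (m ∈ (L.foldl (pvProfileStep t) (p, n, s)).2.2
        ↔ m ∈ s ∨ L.any (fun e => e.2 == m && PySem.Str.isIn e.1 t) = true)) := by
  induction L generalizing p n s with
  | nil => simp
  | cons e L ih =>
    obtain ⟨term, tag⟩ := e
    simp only [List.foldl_cons, List.any_cons]
    by_cases hin : PySem.Str.isIn term t = true
    · by_cases hp : tag = "+"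
      · subst hp
        simp only [pvProfileStep, hin, if_pos rfl, if_true, beq_self_eq_true]
        rcases ih true n s with ⟨h1, h2, h3⟩
        refine ⟨by simp [h1], by simp [h2, hin], ?_⟩
        intro m hmp hmn
        rw [h3 m hmp hmn]
        have hm : (("+" : String) == m) = false := by simp [Ne.symm hmp]
        simp [hm]
      · by_cases hn : tag = "-"
        · subst hn
          have hne : (("-" : String) == "+") = false := by decide
          simp only [pvProfileStep, hin, if_true, hne, Bool.false_eq_true, if_false,
            beq_self_eq_true, if_pos rfl]
          rcases ih p true s with ⟨h1, h2, h3⟩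
          refine ⟨by simp [h1, hne, hin], by simp [h2], ?_⟩
          intro m hmp hmn
          rw [h3 m hmp hmn]
          have hm : (("-" : String) == m) = false := by simp [Ne.symm hmn]
          simp [hm]
        · have hp' : (tag == "+") = false := by simp [hp]
          have hn' : (tag == "-") = false := by simp [hn]
          simp only [pvProfileStep, hin, if_true, hp', hn', Bool.false_eq_true, if_false]
          rcases ih p n (PySem.Set.add s tag) with ⟨h1, h2, h3⟩
          refine ⟨by simp [h1, hp'], by simp [h2, hn'], ?_⟩
          intro m hmp hmn
          rw [h3 m hmp hmn]
          by_cases hm : tag = m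
          · subst hm; simp [PySem.Set.mem_add, hin]
          · have : (tag == m) = false := by simp [hm]
            simp [PySem.Set.mem_add, this, Ne.symm hm]
    · have hin' : PySem.Str.isIn term t = false := by simpa using hin
      simp only [pvProfileStep, hin', Bool.false_eq_true, if_false, hin', Bool.and_false,
        Bool.or_false]
      exact ih p n s

-- B's profile polarity is A's polarity of the lowered text
theorem pvProfile_fst (x : String) : (pvProfile x).1 = polA (PySem.Str.lower x) := by
  rcases pvProfile_fold_spec (PySem.Str.lower x) pvTermTable false false PySem.Set.empty
    with ⟨h1, h2, -⟩
  have e1 : pvTermTable.any (fun e => e.2 == "+" && PySem.Str.isIn e.1 (PySem.Str.lower x))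
      = pvAnyIn pvPositiveTerms (PySem.Str.lower x) := by
    simp [pvTermTable, pvPositiveTerms, pvNegativeTerms, pvMetricKeywords, pvAnyIn]
  have e2 : pvTermTable.any (fun e => e.2 == "-" && PySem.Str.isIn e.1 (PySem.Str.lower x))
      = pvAnyIn pvNegativeTerms (PySem.Str.lower x) := by
    simp [pvTermTable, pvPositiveTerms, pvNegativeTerms, pvMetricKeywords, pvAnyIn]
  simp only [pvProfile, polA, h1, h2, e1, e2, Bool.false_or]

-- membership in B's metric set ↔ A's keyword test, for each metric of the table
theorem pvProfile_metrics (x : String) (name : String) (kws : List String)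
    (hmem : (name, kws) ∈ pvMetricKeywords) :
    ((pvProfile x).2.contains name) = pvAnyIn kws (PySem.Str.lower x) := by
  rcases pvProfile_fold_spec (PySem.Str.lower x) pvTermTable false false PySem.Set.empty
    with ⟨-, -, h3⟩
  fin_cases hmem <;>
  · simp only [pvProfile]
    rw [Bool.eq_iff_iff, PySem.Set.contains_iff, h3 _ (by decide) (by decide)]
    simp [pvTermTable, pvPositiveTerms, pvNegativeTerms, pvMetricKeywords, pvAnyIn]

-- When no conflict is possible, every iteration of A's loop falls through.
theorem pvALoop_no_conflict (ta tb : String)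
    (h : (polA ta == polA tb || polA ta == "neutral" || polA tb == "neutral") = true) :
    ∀ L : List (String × List String), pvALoop ta tb L = (none, none, none) := by
  intro L
  induction L with
  | nil => rfl
  | cons hd tl ih =>
    obtain ⟨name, kws⟩ := hd
    simp only [pvALoop]
    split
    · exact ih
    · have : (polA ta != polA tb
          && !(polA ta == "neutral" || polA tb == "neutral")) = false := by
        simp only [polA] at h ⊢
        revert h
        split_ifs <;> decide
      simp only [polA] at this
      rw [this]
      exact ih

-- When a conflict exists, A's loop returns the first metric both texts mention.
theorem pvALoop_conflict (ta tb : String)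
    (h : (polA ta == polA tb || polA ta == "neutral" || polA tb == "neutral") = false) :
    ∀ L : List (String × List String),
      pvALoop ta tb L =
        (match L.find? (fun m => pvAnyIn m.2 ta && pvAnyIn m.2 tb) with
         | some m => (some m.1, some (polA ta), some (polA tb))
         | none => (none, none, none)) := by
  intro L
  induction L with
  | nil => rfl
  | cons hd tl ih =>
    obtain ⟨name, kws⟩ := hd
    simp only [pvALoop, List.find?]
    by_cases hm : (pvAnyIn kws ta && pvAnyIn kws tb) = true
    · rw [if_neg (by simp [hm]), hm]
      have hc : (polA ta != polA tb
          && !(polA ta == "neutral" || polA tb == "neutral")) = true := by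
        revert h
        simp [bne]
        tauto
      simp only [polA] at hc
      rw [hc]
      simp [polA]
    · have hm' : (pvAnyIn kws ta && pvAnyIn kws tb) = false := by simpa using hm
      rw [if_pos (by simp [hm']), hm']
      simpa using ih

-- B's find? over the metric-name order equals A's find? over the (name, keywords) pairs
theorem pv_find_eq (x y : String) :
    pvMetricOrder.find? (fun metric =>
        PySem.Set.contains (pvProfile x).2 metric && PySem.Set.contains (pvProfile y).2 metric)
      = (pvMetricKeywords.find? (fun m =>
          pvAnyIn m.2 (PySem.Str.lower x) && pvAnyIn m.2 (PySem.Str.lower y))).map Prod.fst := by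
  have h : ∀ name kws, (name, kws) ∈ pvMetricKeywords →
      (PySem.Set.contains (pvProfile x).2 name && PySem.Set.contains (pvProfile y).2 name)
        = (pvAnyIn kws (PySem.Str.lower x) && pvAnyIn kws (PySem.Str.lower y)) := by
    intro name kws hm
    rw [pvProfile_metrics x name kws hm, pvProfile_metrics y name kws hm]
  simp only [pvMetricOrder, pvMetricKeywords, List.map, List.find?]
  rw [h "productivity" ["productivity", "efficiency", "output", "throughput", "utilization", "performance", "capacity"] (by decide),
      h "cost" ["cost", "expense", "spend", "budget", "price", "overhead", "opex", "capex"] (by decide),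
      h "revenue" ["revenue", "sales", "income", "profit", "margin", "earnings", "return", "roi"] (by decide),
      h "risk" ["risk", "exposure", "liability", "threat", "vulnerability", "compliance", "security", "safety"] (by decide),
      h "quality" ["quality", "accuracy", "reliability", "consistency", "defect", "error", "issue", "problem"] (by decide),
      h "time" ["time", "duration", "speed", "latency", "cycle time", "lead time", "response time", "turnaround"] (by decide),
      h "customer" ["customer satisfaction", "nps", "churn", "retention", "engagement", "loyalty", "experience"] (by decide)]
  cases pvAnyIn ["productivity", "efficiency", "output", "throughput", "utilization", "performance", "capacity"] (PySem.Str.lower x) && pvAnyIn ["productivity", "efficiency", "output", "throughput", "utilization", "performance", "capacity"] (PySem.Str.lower y) <;>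
  cases pvAnyIn ["cost", "expense", "spend", "budget", "price", "overhead", "opex", "capex"] (PySem.Str.lower x) && pvAnyIn ["cost", "expense", "spend", "budget", "price", "overhead", "opex", "capex"] (PySem.Str.lower y) <;>
  cases pvAnyIn ["revenue", "sales", "income", "profit", "margin", "earnings", "return", "roi"] (PySem.Str.lower x) && pvAnyIn ["revenue", "sales", "income", "profit", "margin", "earnings", "return", "roi"] (PySem.Str.lower y) <;>
  cases pvAnyIn ["risk", "exposure", "liability", "threat", "vulnerability", "compliance", "security", "safety"] (PySem.Str.lower x) && pvAnyIn ["risk", "exposure", "liability", "threat", "vulnerability", "compliance", "security", "safety"] (PySem.Str.lower y) <;>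
  cases pvAnyIn ["quality", "accuracy", "reliability", "consistency", "defect", "error", "issue", "problem"] (PySem.Str.lower x) && pvAnyIn ["quality", "accuracy", "reliability", "consistency", "defect", "error", "issue", "problem"] (PySem.Str.lower y) <;>
  cases pvAnyIn ["time", "duration", "speed", "latency", "cycle time", "lead time", "response time", "turnaround"] (PySem.Str.lower x) && pvAnyIn ["time", "duration", "speed", "latency", "cycle time", "lead time", "response time", "turnaround"] (PySem.Str.lower y) <;>
  cases pvAnyIn ["customer satisfaction", "nps", "churn", "retention", "engagement", "loyalty", "experience"] (PySem.Str.lower x) && pvAnyIn ["customer satisfaction", "nps", "churn", "retention", "engagement", "loyalty", "experience"] (PySem.Str.lower y) <;>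
  simp

-- Boolean De Morgan bridge between B's conflict test and the negation of the fall-through test
theorem pvDeMorgan (a b : String) :
    (a != b && a != "neutral" && b != "neutral") = !(a == b || a == "neutral" || b == "neutral") := by
  cases h1 : a == b <;> cases h2 : a == "neutral" <;> cases h3 : b == "neutral" <;>
    simp [bne, h1, h2, h3]

-- ===== VERDICT (by name: the statement is the Claim_ definition above) =====
theorem detect_polarity_conflict_py_spec : Claim_equal_detect_polarity_conflict_py := by
  intro text_a text_b _
  unfold Spec_detect_polarity_conflict_py detect_polarity_conflict_py detect_polarity_conflict_py_alt
  dsimp only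
  rw [pv_find_eq]
  set ta := PySem.Str.lower text_a
  set tb := PySem.Str.lower text_b
  have hfa := pvProfile_fst text_a
  have hfb := pvProfile_fst text_b
  rw [hfa, hfb]
  by_cases h : (polA ta == polA tb || polA ta == "neutral" || polA tb == "neutral") = true
  · rw [pvALoop_no_conflict ta tb h, pvDeMorgan, h]
    simp
  · have h' : (polA ta == polA tb || polA ta == "neutral" || polA tb == "neutral") = false := by
      simpa using h
    rw [pvALoop_conflict ta tb h', pvDeMorgan, h']
    simp only [Bool.not_false, if_true]
    cases pvMetricKeywords.find? (fun m => pvAnyIn m.2 ta && pvAnyIn m.2 tb) <;> simp <;> exact ⟨rfl, rfl⟩
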